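-- pv_equiv track=rewrite | github.com/smaht-dac/smaht-portal | src/encoded/tests/test_annotated_filename.py | parse_analysis_and_extension_part
-- ===== SOURCE A (Python) =====
-- from typing import Any, Dict, List, Tuple
--
-- def parse_analysis_and_extension_part(
--     analysis_and_extension_part: str,
-- ) -> Tuple[str, str]:
--     """Parse analysis and extension from annotated filename."""
--     if analysis_and_extension_part.startswith("."):
--         analysis = ""
--         extension = analysis_and_extension_part
--     else:
--         parts = analysis_and_extension_part.split(".")
--         analysis = ""
--         extension = ""
--         for index, part in enumerate(parts):
--             if index == 0:
--                 to_add = part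
--                 analysis += to_add
--             else:
--                 to_add = f".{part}"
--                 if has_starting_digit(part):
--                     analysis += to_add
--                 elif extension:
--                     extension += to_add
--                 else:
--                     extension = part
--     return analysis, extension
--
-- def has_starting_digit(string: str) -> bool:
--     """Check if string has starting digit."""
--     return string[0].isdigit()
-- ===== SOURCE B (Python) =====
-- def parse_analysis_and_extension_part(analysis_and_extension_part):
--     """Parse analysis and extension via a single character-level state-machine scan (no split)."""
--     s = analysis_and_extension_part
--     if s.startswith("."):
--         return "", s
--     analysis = []
--     extension = []
--     buf = analysis
--     for i, c in enumerate(s):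
--         if c == ".":
--             nxt = s[i + 1] if i + 1 < len(s) else ""
--             if nxt.isdigit():
--                 buf = analysis
--                 buf.append(".")
--             else:
--                 buf = extension
--                 if extension:
--                     buf.append(".")
--         else:
--             buf.append(c)
--     return "".join(analysis), "".join(extension)
-- ===== Notes on version B (the rewrite author's own statement) =====
-- stated objective: alternative
-- what changed: A splits the string into a parts list and runs an interleaved enumerate-loop over the parts; B never splits: it makes a single character-level state-machine pass over the string, using a one-character lookahead after each dot to decide which of the two output buffers subsequent characters are routed into.
import Mathlib
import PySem

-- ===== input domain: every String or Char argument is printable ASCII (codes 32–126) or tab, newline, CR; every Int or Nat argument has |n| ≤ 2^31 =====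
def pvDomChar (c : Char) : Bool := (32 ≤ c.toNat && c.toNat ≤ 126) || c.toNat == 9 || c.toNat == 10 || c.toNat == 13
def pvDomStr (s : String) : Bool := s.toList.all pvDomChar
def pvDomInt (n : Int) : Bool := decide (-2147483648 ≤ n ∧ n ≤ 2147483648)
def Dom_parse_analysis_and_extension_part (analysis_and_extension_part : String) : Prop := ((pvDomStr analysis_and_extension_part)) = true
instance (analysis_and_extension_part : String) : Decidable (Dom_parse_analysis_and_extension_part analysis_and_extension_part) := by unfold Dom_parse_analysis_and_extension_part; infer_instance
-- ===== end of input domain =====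

-- B replaces A's split-into-parts + interleaved loop over the parts list by a single
-- character-level state-machine scan of the string (lookahead after each dot chooses
-- the buffer); same return value on Pre_.

-- ===== PORT A =====
-- has_starting_digit: string[0].isdigit(); Python raises IndexError when the part is empty (pyGet? = none) —
-- those inputs are excluded by Pre_ below; the `none` branch value is never reached inside Pre_.
def pvHasStartingDigit (p : List Char) : Bool :=
  match PySem.List.pyGet? p 0 with
  | some c => PySem.Chars.isdigit c
  | none => false

def parse_analysis_and_extension_part (analysis_and_extension_part : String) : String × String :=
  if PySem.Chars.startswith analysis_and_extension_part.toList ['.'] then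
    ("", analysis_and_extension_part)
  else
    let parts := PySem.Chars.splitOn analysis_and_extension_part.toList ['.']
    let r := (PySem.List.enumerate parts).foldl (fun (st : List Char × List Char) ip =>
      if ip.1 == 0 then
        (st.1 ++ ip.2, st.2)
      else
        let to_add := '.' :: ip.2
        if pvHasStartingDigit ip.2 then (st.1 ++ to_add, st.2)
        else if st.2 ≠ [] then (st.1, st.2 ++ to_add)
        else (st.1, ip.2)) ([], [])
    (String.ofList r.1, String.ofList r.2)

-- ===== PORT B =====
-- Source B's for-loop over (i, c) with lookahead s[i+1]: recursion over the character list,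
-- the lookahead being the head of the remaining characters; state = the two buffers plus
-- which buffer characters are currently routed into (buf is analysis ↔ bufA = true).
-- ''.isdigit() is False, hence the `[] => false` lookahead branch.
def pvScanB : List Char → List Char → List Char → Bool → List Char × List Char
  | [], a, e, _ => (a, e)
  | c :: rest, a, e, bufA =>
    if c = '.' then
      let nxtDigit := match rest with
        | n :: _ => PySem.Chars.isdigit n
        | [] => false
      if nxtDigit then pvScanB rest (a ++ ['.']) e true
      else if e ≠ [] then pvScanB rest a (e ++ ['.']) false
      else pvScanB rest a e false
    else
      if bufA then pvScanB rest (a ++ [c]) e bufA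
      else pvScanB rest a (e ++ [c]) bufA

def parse_analysis_and_extension_part_alt (analysis_and_extension_part : String) : String × String :=
  if PySem.Chars.startswith analysis_and_extension_part.toList ['.'] then
    ("", analysis_and_extension_part)
  else
    let r := pvScanB analysis_and_extension_part.toList [] [] true
    (String.ofList r.1, String.ofList r.2)

-- ===== PRECONDITION & SPEC =====
-- Pre_ excludes exactly the inputs on which Python A raises IndexError (has_starting_digit of an
-- empty part): strings not starting with a dot whose dot-split has an empty part after the first
-- (a doubled or trailing dot, e.g. "a..b").
def Pre_parse_analysis_and_extension_part (analysis_and_extension_part : String) : Prop :=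
  PySem.Chars.startswith analysis_and_extension_part.toList ['.'] = true ∨
    ∀ p ∈ (PySem.Chars.splitOn analysis_and_extension_part.toList ['.']).tail, p ≠ []
instance (analysis_and_extension_part : String) : Decidable (Pre_parse_analysis_and_extension_part analysis_and_extension_part) := by unfold Pre_parse_analysis_and_extension_part; infer_instance

def pvWitness_parse_analysis_and_extension_part : String := "fastqc.2.1.tar.gz"

def Spec_parse_analysis_and_extension_part (analysis_and_extension_part : String) (out : String × String) : Prop := out = parse_analysis_and_extension_part_alt analysis_and_extension_part
instance (analysis_and_extension_part : String) (out : String × String) : Decidable (Spec_parse_analysis_and_extension_part analysis_and_extension_part out) := by unfold Spec_parse_analysis_and_extension_part; infer_instance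

-- ===== CLAIM (what is proved, stated in full; the proofs are below) =====
def Claim_equal_parse_analysis_and_extension_part : Prop := ∀ (analysis_and_extension_part : String), Dom_parse_analysis_and_extension_part analysis_and_extension_part → Pre_parse_analysis_and_extension_part analysis_and_extension_part → Spec_parse_analysis_and_extension_part analysis_and_extension_part (parse_analysis_and_extension_part analysis_and_extension_part)

-- ===== LEMMAS AND PROOFS =====


lemma pvSplitOnGo (fuel : Nat) (l cur : List Char) (acc : List (List Char))
    (h : l.length ≤ fuel) :
    PySem.Chars.splitOn.go ['.'] fuel l cur acc
      = acc.reverse ++ (List.splitOn '.' l).modifyHead (cur.reverse ++ ·) := by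
  induction fuel generalizing l cur acc with
  | zero =>
    have : l = [] := List.length_eq_zero_iff.mp (Nat.le_zero.mp h)
    subst this
    rw [PySem.Chars.splitOn.go.eq_def]
    simp [List.splitOn]
  | succ fuel ih =>
    cases l with
    | nil =>
      rw [PySem.Chars.splitOn.go.eq_def]
      simp [List.splitOn]
    | cons c rest =>
      rw [PySem.Chars.splitOn.go.eq_def]
      simp only []
      by_cases hc : c = '.'
      · subst hc
        have hpre : List.isPrefixOf ['.'] ('.' :: rest) = true := by simp [List.isPrefixOf]
        simp only [hpre, if_true, List.length_cons] at *
        have hdrop : List.drop (List.length ([] : List Char) + 1) ('.' :: rest) = rest := by simp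
        rw [hdrop, ih rest [] (cur.reverse :: acc) (by omega)]
        have : List.splitOn '.' ('.' :: rest) = [] :: List.splitOn '.' rest := by
          simp [List.splitOn, List.splitOnP_cons]
        rw [this]
        cases hsp : List.splitOn '.' rest with
        | nil => exact absurd hsp (by simp [List.splitOn, List.splitOnP_ne_nil])
        | cons q t => simp
      · have hpre : List.isPrefixOf ['.'] (c :: rest) = false := by
          simp [List.isPrefixOf]; exact fun hh => absurd hh.symm hc
        simp only [hpre, Bool.false_eq_true, if_false, List.length_cons] at *
        rw [ih rest (c :: cur) acc (by omega)]
        have : List.splitOn '.' (c :: rest) = (List.splitOn '.' rest).modifyHead (c :: ·) := by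
          simp [List.splitOn, List.splitOnP_cons, hc]
        rw [this]
        cases hsp : List.splitOn '.' rest with
        | nil => exact absurd hsp (by simp [List.splitOn, List.splitOnP_ne_nil])
        | cons q t => simp

lemma pvSplitOn_eq (l : List Char) :
    PySem.Chars.splitOn l ['.'] = List.splitOn '.' l := by
  rw [PySem.Chars.splitOn, pvSplitOnGo _ _ _ _ (by omega)]
  cases hsp : List.splitOn '.' l with
  | nil => exact absurd hsp (by simp [List.splitOn, List.splitOnP_ne_nil])
  | cons q t => simp

lemma pvNoDot (l : List Char) : ∀ p ∈ List.splitOn '.' l, '.' ∉ p := by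
  induction l with
  | nil => simp [List.splitOn]
  | cons c rest ih =>
    by_cases hc : c = '.'
    · subst hc
      have : List.splitOn '.' ('.' :: rest) = [] :: List.splitOn '.' rest := by
        simp [List.splitOn, List.splitOnP_cons]
      rw [this]
      intro p hp
      rcases hp with _ | hp
      · simp
      · exact ih p (by assumption)
    · have : List.splitOn '.' (c :: rest) = (List.splitOn '.' rest).modifyHead (c :: ·) := by
        simp [List.splitOn, List.splitOnP_cons, hc]
      rw [this]
      cases hsp : List.splitOn '.' rest with
      | nil => simp
      | cons q t =>
        intro p hp
        rcases List.mem_cons.mp (by simpa using hp) with hq | ht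
        · subst hq
          have hq' : '.' ∉ q := ih q (by rw [hsp]; exact List.mem_cons_self)
          simp [hq']
          intro hh
          exact absurd hh.symm hc
        · exact ih p (by rw [hsp]; exact List.mem_cons_of_mem _ ht)

lemma pvReconstruct (h : List Char) (t : List (List Char)) :
    ['.'].intercalate (h :: t) = h ++ t.flatMap (fun p => '.' :: p) := by
  induction t generalizing h with
  | nil => simp [List.intercalate]
  | cons q t ih =>
    have := ih q
    simp only [List.intercalate] at this ⊢
    rw [List.intersperse_cons₂]
    simp only [List.flatten_cons, List.flatten_cons, List.flatMap_cons]
    rw [show (List.intersperse ['.'] (q :: t)).flatten = q ++ t.flatMap (fun p => '.' :: p) from by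
      simpa [List.intercalate] using this]
    simp

-- A's loop body over the tail parts
def pvStep (st : List Char × List Char) (p : List Char) : List Char × List Char :=
  if pvHasStartingDigit p then (st.1 ++ '.' :: p, st.2)
  else if st.2 ≠ [] then (st.1, st.2 ++ '.' :: p)
  else (st.1, p)

lemma pvScanB_nondot (c : Char) (l a e : List Char) (bufA : Bool) (hc : c ≠ '.') :
    pvScanB (c :: l) a e bufA
      = if bufA then pvScanB l (a ++ [c]) e bufA else pvScanB l a (e ++ [c]) bufA := by
  simp [pvScanB, hc]

lemma pvScanSeg (p : List Char) (rest a e : List Char) (bufA : Bool) (hp : '.' ∉ p) :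
    pvScanB (p ++ rest) a e bufA
      = pvScanB rest (if bufA then a ++ p else a) (if bufA then e else e ++ p) bufA := by
  induction p generalizing a e with
  | nil => simp
  | cons c q ih =>
    have hc : c ≠ '.' := fun h => hp (h ▸ List.mem_cons_self)
    have hq : '.' ∉ q := fun h => hp (List.mem_cons_of_mem _ h)
    cases bufA with
    | true =>
      rw [List.cons_append, pvScanB_nondot c _ _ _ _ hc, if_pos rfl, ih _ _ hq]
      simp
    | false =>
      rw [List.cons_append, pvScanB_nondot c _ _ _ _ hc, if_neg (by simp), ih _ _ hq]
      simp

lemma pvScanParts (ts : List (List Char)) (hts : ∀ p ∈ ts, p ≠ [] ∧ '.' ∉ p)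
    (a e : List Char) (bufA : Bool) :
    pvScanB (ts.flatMap (fun p => '.' :: p)) a e bufA = ts.foldl pvStep (a, e) := by
  induction ts generalizing a e bufA with
  | nil => simp [pvScanB]
  | cons p ts ih =>
    obtain ⟨hpne, hpd⟩ := hts p List.mem_cons_self
    have hts' : ∀ q ∈ ts, q ≠ [] ∧ '.' ∉ q := fun q hq => hts q (List.mem_cons_of_mem _ hq)
    cases p with
    | nil => exact absurd rfl hpne
    | cons x xs =>
      have hx : x ≠ '.' := fun h => hpd (h ▸ List.mem_cons_self)
      have hxs : '.' ∉ xs := fun h => hpd (List.mem_cons_of_mem _ h)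
      simp only [List.flatMap_cons, List.cons_append, List.foldl_cons]
      show pvScanB ('.' :: (x :: xs ++ ts.flatMap _)) a e bufA = _
      rw [show pvScanB ('.' :: (x :: xs ++ ts.flatMap (fun p => '.' :: p))) a e bufA
            = (if PySem.Chars.isdigit x then
                 pvScanB (x :: xs ++ ts.flatMap (fun p => '.' :: p)) (a ++ ['.']) e true
               else if e ≠ [] then
                 pvScanB (x :: xs ++ ts.flatMap (fun p => '.' :: p)) a (e ++ ['.']) false
               else pvScanB (x :: xs ++ ts.flatMap (fun p => '.' :: p)) a e false) from by
        simp [pvScanB]]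
      have hdig : pvHasStartingDigit (x :: xs) = PySem.Chars.isdigit x := by
        simp [pvHasStartingDigit, PySem.List.pyGet?, PySem.List.pyIdx?]
      by_cases hd : PySem.Chars.isdigit x = true
      · rw [if_pos hd]
        rw [show (x :: xs) ++ ts.flatMap (fun p => '.' :: p)
              = (x :: xs) ++ ts.flatMap (fun p => '.' :: p) from rfl]
        rw [pvScanSeg (x :: xs) _ _ _ _ hpd]
        rw [ih hts']
        simp [pvStep, hdig, hd]
      · rw [if_neg hd]
        by_cases he : e = []
        · subst he
          simp only [ne_eq, not_true_eq_false, if_neg, if_false]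
          rw [pvScanSeg (x :: xs) _ _ _ _ hpd]
          rw [ih hts']
          simp [pvStep, hdig, hd]
        · rw [if_pos he]
          rw [pvScanSeg (x :: xs) _ _ _ _ hpd]
          rw [ih hts']
          simp [pvStep, hdig, hd, he]

lemma pvLoopA (rest : List (List Char)) (n : Int) (hn : 1 ≤ n) (a e : List Char) :
    (PySem.List.enumerate rest n).foldl (fun (st : List Char × List Char) ip =>
      if ip.1 == 0 then
        (st.1 ++ ip.2, st.2)
      else
        if pvHasStartingDigit ip.2 then (st.1 ++ '.' :: ip.2, st.2)
        else if st.2 ≠ [] then (st.1, st.2 ++ '.' :: ip.2)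
        else (st.1, ip.2)) (a, e)
    = rest.foldl pvStep (a, e) := by
  induction rest generalizing n a e with
  | nil => simp [PySem.List.enumerate_nil]
  | cons p t ih =>
    rw [PySem.List.enumerate_cons, List.foldl_cons, List.foldl_cons]
    have hn0 : (n == 0) = false := by simp; omega
    simp only [hn0, Bool.false_eq_true, if_false]
    have hinit : (if pvHasStartingDigit p then (a ++ '.' :: p, e)
        else if e ≠ [] then (a, e ++ '.' :: p) else (a, p)) = pvStep (a, e) p := rfl
    rw [hinit]
    rcases hst : pvStep (a, e) p with ⟨a', e'⟩
    exact ih (n + 1) (by omega) a' e'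

-- ===== VERDICT (by name: the statement is the Claim_ definition above) =====
theorem parse_analysis_and_extension_part_spec : Claim_equal_parse_analysis_and_extension_part := by
  intro s _ hpre
  unfold Spec_parse_analysis_and_extension_part
  unfold parse_analysis_and_extension_part parse_analysis_and_extension_part_alt
  by_cases hsw : PySem.Chars.startswith s.toList ['.'] = true
  · simp [hsw]
  · simp only [hsw, Bool.false_eq_true, if_false]
    rcases hpre with hpre | hne
    · exact absurd hpre hsw
    · rw [pvSplitOn_eq] at hne ⊢
      cases h : List.splitOn '.' s.toList with
      | nil => exact absurd h (by simp [List.splitOn, List.splitOnP_ne_nil])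
      | cons head ts =>
        rw [h] at hne
        simp only [List.tail_cons] at hne
        have hparts : ∀ p ∈ head :: ts, '.' ∉ p := by
          intro p hp; exact pvNoDot s.toList p (h ▸ hp)
        have hrec : s.toList = head ++ ts.flatMap (fun p => '.' :: p) := by
          conv_lhs => rw [← List.intercalate_splitOn (xs := s.toList) '.']
          rw [h, pvReconstruct]
        -- B side
        have hB : pvScanB s.toList [] [] true = ts.foldl pvStep (head, []) := by
          rw [hrec, pvScanSeg head _ [] [] true (hparts head List.mem_cons_self)]
          simp only [if_pos rfl, List.nil_append]
          exact pvScanParts ts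
            (fun p hp => ⟨hne p hp, hparts p (List.mem_cons_of_mem _ hp)⟩) head [] true
        -- A side
        simp only [PySem.List.enumerate_cons, List.foldl_cons]
        have h00 : ((0 : Int) == 0) = true := by decide
        simp only [h00, if_true]
        have h01 : (0 : Int) + 1 = 1 := rfl
        rw [h01, pvLoopA ts 1 (by omega) ([] ++ head) [], hB]
        simp
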